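-- pv_equiv track=rewrite | github.com/matatusko/seq2seq | preprocess_data.py | convert_data_to_ints
-- ===== SOURCE A (Python) =====
-- def convert_data_to_ints(data, vocab2int, word_count, unk_count, eos=True):
--     """
--     Converts the words in the data into their corresponding integer values.
--
--     Input:
--         data: a list of texts in the corpus
--         vocab2list: conversion dictionaries
--         word_count: an integer to count the words in the dataset
--         unk_count: an integer to count the <UNK> tokens in the dataset
--         eos: boolean whether to append <EOS> token at the end or not (default true)
--     Returns:
--         converted_data: a list of corpus texts converted to integers
--         word_count: updated word count
--         unk_count: updated unk_count
--     """
--     converted_data = []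
--     for text in data:
--         converted_text = []
--         for token in text.split():
--             word_count += 1
--             if token in vocab2int:
--                 # Convert each token in the paragraph to int and append it
--                 converted_text.append(vocab2int[token])
--             else:
--                 # If it's not in the dictionary, use the int for <UNK> token instead
--                 converted_text.append(vocab2int['<UNK>'])
--                 unk_count += 1
--         if eos:
--             # Append <EOS> token if specified
--             converted_text.append(vocab2int['<EOS>'])
--
--         converted_data.append(converted_text)
--
--     assert len(converted_data) == len(data)
--     return converted_data, word_count, unk_count
-- ===== SOURCE B (Python) =====
-- def convert_data_to_ints(data, vocab2int, word_count, unk_count, eos=True):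
--     # Flatten the whole corpus into one token stream, convert that stream in a
--     # single flat pass (counting misses as it goes), then reconstitute the
--     # per-text id lists by slicing the flat result with the recorded lengths.
--     lengths = []
--     flat = []
--     for text in data:
--         toks = text.split()
--         lengths.append(len(toks))
--         flat.extend(toks)
--     flat_ids = []
--     misses = 0
--     for t in flat:
--         if t in vocab2int:
--             flat_ids.append(vocab2int[t])
--         else:
--             flat_ids.append(vocab2int['<UNK>'])
--             misses += 1
--     converted_data = []
--     pos = 0
--     for n in lengths:
--         chunk = flat_ids[pos:pos + n]
--         if eos:
--             chunk.append(vocab2int['<EOS>'])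
--         converted_data.append(chunk)
--         pos += n
--     return converted_data, word_count + len(flat), unk_count + misses
-- ===== Notes on version B (the rewrite author's own statement) =====
-- stated objective: alternative
-- what changed: Replaces A's per-text nested loop with interleaved counter increments by a flatten/convert/reslice pipeline: the corpus is flattened into one token stream with recorded per-text lengths, converted and miss-counted in a single flat pass, and the per-text lists are reconstituted by slicing the flat id list.
import Mathlib
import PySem

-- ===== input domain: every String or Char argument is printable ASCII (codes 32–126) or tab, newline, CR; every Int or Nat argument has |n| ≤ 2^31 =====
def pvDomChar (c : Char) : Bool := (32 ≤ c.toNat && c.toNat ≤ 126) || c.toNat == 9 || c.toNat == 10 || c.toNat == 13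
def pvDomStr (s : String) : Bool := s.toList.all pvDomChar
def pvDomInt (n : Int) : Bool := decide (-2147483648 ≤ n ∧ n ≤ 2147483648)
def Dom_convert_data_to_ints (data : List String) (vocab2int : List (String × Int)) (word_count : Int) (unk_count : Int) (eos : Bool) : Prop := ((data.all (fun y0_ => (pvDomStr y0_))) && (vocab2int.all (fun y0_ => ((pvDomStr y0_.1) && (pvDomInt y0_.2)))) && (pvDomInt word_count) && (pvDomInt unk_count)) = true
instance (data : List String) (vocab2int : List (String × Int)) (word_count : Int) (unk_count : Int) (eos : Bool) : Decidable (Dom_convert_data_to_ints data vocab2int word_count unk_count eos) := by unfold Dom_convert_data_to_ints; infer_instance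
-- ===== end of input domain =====

-- B replaces A's per-text nested pass by a flatten / convert-flat / reslice
-- pipeline; objective: alternative decomposition, same asymptotic cost.

-- ===== PORT A =====
-- A's incremental pass: nested foldl carrying (converted, word_count, unk_count).
-- `vocab2int[k]` on a miss raises KeyError in Python; Pre_ excludes exactly those
-- inputs, so the `.getD 0` defaults below are never reached inside Pre_.
def convert_data_to_ints (data : List String) (vocab2int : List (String × Int)) (word_count : Int) (unk_count : Int) (eos : Bool) : List (List Int) × Int × Int :=
  data.foldl (fun (acc : List (List Int) × Int × Int) text =>
    let inner := (PySem.Str.split₀ text).foldl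
      (fun (s : List Int × Int × Int) token =>
        let wc := s.2.1 + 1
        match vocab2int.lookup token with
        | some v => (s.1 ++ [v], wc, s.2.2)
        | none   => (s.1 ++ [(vocab2int.lookup "<UNK>").getD 0], wc, s.2.2 + 1))
      ([], acc.2.1, acc.2.2)
    let converted_text :=
      if eos then inner.1 ++ [(vocab2int.lookup "<EOS>").getD 0] else inner.1
    (acc.1 ++ [converted_text], inner.2.1, inner.2.2))
    ([], word_count, unk_count)

-- ===== PORT B =====
-- B's three stages: flatten the corpus recording lengths, convert the flat
-- stream counting misses, then reslice by the recorded lengths.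
def convert_data_to_ints_alt (data : List String) (vocab2int : List (String × Int)) (word_count : Int) (unk_count : Int) (eos : Bool) : List (List Int) × Int × Int :=
  let lf := data.foldl (fun (acc : List Int × List String) text =>
    let toks := PySem.Str.split₀ text
    (acc.1 ++ [(toks.length : Int)], acc.2 ++ toks)) ([], [])
  let fm := lf.2.foldl (fun (acc : List Int × Int) t =>
    match vocab2int.lookup t with
    | some v => (acc.1 ++ [v], acc.2)
    | none   => (acc.1 ++ [(vocab2int.lookup "<UNK>").getD 0], acc.2 + 1)) ([], 0)
  let cp := lf.1.foldl (fun (acc : List (List Int) × Int) n =>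
    let chunk := PySem.List.slice fm.1 (some acc.2) (some (acc.2 + n))
    let chunk := if eos then chunk ++ [(vocab2int.lookup "<EOS>").getD 0] else chunk
    (acc.1 ++ [chunk], acc.2 + n)) ([], 0)
  (cp.1, word_count + (lf.2.length : Int), unk_count + fm.2)

-- ===== PRECONDITION & SPEC =====
-- Pre_ excludes exactly the inputs where Python A raises KeyError: a token
-- missing from vocab2int while '<UNK>' is also missing, or eos with nonempty
-- data while '<EOS>' is missing. B raises on the same inputs.
def Pre_convert_data_to_ints (data : List String) (vocab2int : List (String × Int)) (word_count : Int) (unk_count : Int) (eos : Bool) : Prop :=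
  (∀ text ∈ data, ∀ tok ∈ PySem.Str.split₀ text,
      (vocab2int.lookup tok).isSome ∨ (vocab2int.lookup "<UNK>").isSome)
  ∧ (eos = true → data ≠ [] → (vocab2int.lookup "<EOS>").isSome)
instance (data : List String) (vocab2int : List (String × Int)) (word_count : Int) (unk_count : Int) (eos : Bool) : Decidable (Pre_convert_data_to_ints data vocab2int word_count unk_count eos) := by unfold Pre_convert_data_to_ints; infer_instance

def pvWitness_convert_data_to_ints : List String × (List (String × Int)) × Int × Int × Bool :=
  (["a b zz", "b"], [("a", 1), ("b", 2), ("<UNK>", 9), ("<EOS>", 5)], 10, 1, true)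

def Spec_convert_data_to_ints (data : List String) (vocab2int : List (String × Int)) (word_count : Int) (unk_count : Int) (eos : Bool) (out : List (List Int) × Int × Int) : Prop := out = convert_data_to_ints_alt data vocab2int word_count unk_count eos
instance (data : List String) (vocab2int : List (String × Int)) (word_count : Int) (unk_count : Int) (eos : Bool) (out : List (List Int) × Int × Int) : Decidable (Spec_convert_data_to_ints data vocab2int word_count unk_count eos out) := by unfold Spec_convert_data_to_ints; infer_instance

-- ===== CLAIM (what is proved, stated in full; the proofs are below) =====
def Claim_equal_convert_data_to_ints : Prop := ∀ (data : List String) (vocab2int : List (String × Int)) (word_count : Int) (unk_count : Int) (eos : Bool), Dom_convert_data_to_ints data vocab2int word_count unk_count eos → Pre_convert_data_to_ints data vocab2int word_count unk_count eos → Spec_convert_data_to_ints data vocab2int word_count unk_count eos (convert_data_to_ints data vocab2int word_count unk_count eos)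

-- ===== LEMMAS AND PROOFS =====

-- the token conversion both programs perform
def pvConv (vocab2int : List (String × Int)) (t : String) : Int :=
  match vocab2int.lookup t with
  | some v => v
  | none   => (vocab2int.lookup "<UNK>").getD 0

-- A's inner token loop equals map-conversion plus aggregate counts.
theorem pv_inner_loop (vocab2int : List (String × Int)) (toks : List String)
    (acc : List Int) (wc uc : Int) :
    toks.foldl
      (fun (s : List Int × Int × Int) token =>
        let wc := s.2.1 + 1
        match vocab2int.lookup token with
        | some v => (s.1 ++ [v], wc, s.2.2)
        | none   => (s.1 ++ [(vocab2int.lookup "<UNK>").getD 0], wc, s.2.2 + 1))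
      (acc, wc, uc)
    = (acc ++ toks.map (pvConv vocab2int), wc + toks.length,
       uc + ((toks.filter (fun t => (vocab2int.lookup t).isNone)).length : Int)) := by
  induction toks generalizing acc wc uc with
  | nil => simp
  | cons t ts ih =>
    simp only [List.foldl_cons, List.map_cons, List.filter_cons]
    cases h : vocab2int.lookup t with
    | some v =>
      simp only [h, ih, pvConv]
      simp [List.append_assoc]
      omega
    | none =>
      simp only [h, ih, pvConv]
      simp [List.append_assoc]
      omega

-- A's outer loop in canonical (map / sum) form, for any accumulator state.
theorem pv_outer_loop (vocab2int : List (String × Int)) (eos : Bool)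
    (data : List String) (accL : List (List Int)) (wc uc : Int) :
    data.foldl (fun (acc : List (List Int) × Int × Int) text =>
      let inner := (PySem.Str.split₀ text).foldl
        (fun (s : List Int × Int × Int) token =>
          let wc := s.2.1 + 1
          match vocab2int.lookup token with
          | some v => (s.1 ++ [v], wc, s.2.2)
          | none   => (s.1 ++ [(vocab2int.lookup "<UNK>").getD 0], wc, s.2.2 + 1))
        ([], acc.2.1, acc.2.2)
      let converted_text :=
        if eos then inner.1 ++ [(vocab2int.lookup "<EOS>").getD 0] else inner.1
      (acc.1 ++ [converted_text], inner.2.1, inner.2.2))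
      (accL, wc, uc)
    = (accL ++ (data.map PySem.Str.split₀).map (fun toks =>
         toks.map (pvConv vocab2int)
           ++ (if eos then [(vocab2int.lookup "<EOS>").getD 0] else [])),
       wc + ((data.map PySem.Str.split₀).map (fun toks => (toks.length : Int))).sum,
       uc + ((data.map PySem.Str.split₀).map (fun toks =>
         ((toks.filter (fun t => (vocab2int.lookup t).isNone)).length : Int))).sum) := by
  induction data generalizing accL wc uc with
  | nil => simp
  | cons text rest ih =>
    simp only [List.foldl_cons, List.map_cons, List.sum_cons]
    rw [pv_inner_loop]
    simp only [ih, Prod.mk.injEq]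
    refine ⟨?_, by ring, by ring⟩
    cases eos <;> simp [List.append_assoc]

-- B stage 1: the flatten loop records per-text lengths and the flat stream.
theorem pv_flatten_loop (data : List String) (accL : List Int) (accF : List String) :
    data.foldl (fun (acc : List Int × List String) text =>
      let toks := PySem.Str.split₀ text
      (acc.1 ++ [(toks.length : Int)], acc.2 ++ toks)) (accL, accF)
    = (accL ++ (data.map PySem.Str.split₀).map (fun toks => (toks.length : Int)),
       accF ++ (data.map PySem.Str.split₀).flatten) := by
  induction data generalizing accL accF with
  | nil => simp
  | cons text rest ih => simp [ih, List.append_assoc]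

-- B stage 2: the flat conversion loop is map-conversion plus a miss count.
theorem pv_flatpass_loop (vocab2int : List (String × Int)) (flat : List String)
    (acc : List Int) (m : Int) :
    flat.foldl (fun (acc : List Int × Int) t =>
      match vocab2int.lookup t with
      | some v => (acc.1 ++ [v], acc.2)
      | none   => (acc.1 ++ [(vocab2int.lookup "<UNK>").getD 0], acc.2 + 1)) (acc, m)
    = (acc ++ flat.map (pvConv vocab2int),
       m + ((flat.filter (fun t => (vocab2int.lookup t).isNone)).length : Int)) := by
  induction flat generalizing acc m with
  | nil => simp
  | cons t ts ih =>
    simp only [List.foldl_cons, List.map_cons, List.filter_cons]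
    cases h : vocab2int.lookup t with
    | some v => simp only [h, ih, pvConv]; simp [List.append_assoc]
    | none => simp only [h, ih, pvConv]; simp [List.append_assoc]; omega

-- B stage 3: reslicing P ++ L.flatten by the lengths of L recovers L.
theorem pv_reslice_loop (tail : List Int) (L : List (List Int)) (P : List Int)
    (accC : List (List Int)) :
    (L.map (fun l => (l.length : Int))).foldl
      (fun (acc : List (List Int) × Int) n =>
        let chunk := PySem.List.slice (P ++ L.flatten) (some acc.2) (some (acc.2 + n))
        (acc.1 ++ [chunk ++ tail], acc.2 + n)) (accC, (P.length : Int))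
    = (accC ++ L.map (fun l => l ++ tail), ((P ++ L.flatten).length : Int)) := by
  induction L generalizing P accC with
  | nil => simp
  | cons l ls ih =>
    simp only [List.map_cons, List.foldl_cons, List.flatten_cons]
    have hsl : PySem.List.slice (P ++ (l ++ ls.flatten)) (some (P.length : Int))
        (some ((P.length : Int) + (l.length : Int)))
        = l := by
      rw [PySem.List.slice_natCast_add]
      simp
    have hpos : (P.length : Int) + (l.length : Int) = ((P ++ l).length : Int) := by
      simp
    have hF : P ++ (l ++ ls.flatten) = (P ++ l) ++ ls.flatten := by
      simp [List.append_assoc]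
    rw [hsl, hpos, hF, ih]
    simp [List.append_assoc]

-- sum of cast lengths = cast length of the flatten
theorem pv_sum_len (L : List (List String)) :
    (L.map (fun toks => (toks.length : Int))).sum = (L.flatten.length : Int) := by
  induction L with
  | nil => simp
  | cons l ls ih => simp [ih]

-- miss counts per text sum to the miss count of the flat stream
theorem pv_sum_miss (p : String → Bool) (L : List (List String)) :
    (L.map (fun toks => ((toks.filter p).length : Int))).sum
      = ((L.flatten.filter p).length : Int) := by
  induction L with
  | nil => simp
  | cons l ls ih => simp [ih]

-- ===== VERDICT (by name: the statement is the Claim_ definition above) =====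
theorem convert_data_to_ints_spec : Claim_equal_convert_data_to_ints := by
  intro data vocab2int word_count unk_count eos _ _
  unfold Spec_convert_data_to_ints convert_data_to_ints convert_data_to_ints_alt
  rw [pv_outer_loop]
  dsimp only
  rw [pv_flatten_loop]
  dsimp only
  rw [pv_flatpass_loop]
  dsimp only [List.nil_append]
  have hmapflat : (data.map PySem.Str.split₀).flatten.map (pvConv vocab2int)
      = ((data.map PySem.Str.split₀).map (fun toks => toks.map (pvConv vocab2int))).flatten := by
    simp [List.map_flatten]
  have hlen : (data.map PySem.Str.split₀).map (fun toks => (toks.length : Int))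
      = ((data.map PySem.Str.split₀).map (fun toks => toks.map (pvConv vocab2int))).map
          (fun l => (l.length : Int)) := by
    simp [Function.comp]
  rw [hmapflat, hlen]
  cases eos with
  | true =>
    have := pv_reslice_loop [(vocab2int.lookup "<EOS>").getD 0]
      ((data.map PySem.Str.split₀).map (fun toks => toks.map (pvConv vocab2int))) [] []
    simp only [List.length_nil, Nat.cast_zero, List.nil_append] at this
    simp only [if_true]
    rw [this]
    simp only [List.map_map, Prod.mk.injEq]
    refine ⟨by simp [Function.comp], ?_, ?_⟩
    · have h := pv_sum_len (data.map PySem.Str.split₀)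
      simp only [List.map_map] at h hlen ⊢
      rw [← hlen, h]
    · have h := pv_sum_miss (fun t => (vocab2int.lookup t).isNone) (data.map PySem.Str.split₀)
      simp only [List.map_map] at h ⊢
      rw [h]
      ring
  | false =>
    have := pv_reslice_loop ([] : List Int)
      ((data.map PySem.Str.split₀).map (fun toks => toks.map (pvConv vocab2int))) [] []
    simp only [List.length_nil, Nat.cast_zero, List.nil_append, List.append_nil] at this
    simp only [if_false, Bool.false_eq_true]
    rw [this]
    simp only [List.map_map, Prod.mk.injEq]
    refine ⟨by simp [Function.comp], ?_, ?_⟩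
    · have h := pv_sum_len (data.map PySem.Str.split₀)
      simp only [List.map_map] at h hlen ⊢
      rw [← hlen, h]
    · have h := pv_sum_miss (fun t => (vocab2int.lookup t).isNone) (data.map PySem.Str.split₀)
      simp only [List.map_map] at h ⊢
      rw [h]
      ring
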